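-- pv_equiv track=rewrite | github.com/x4714/Bandcamp_urlFilter | app_modules/smoked_salmon.py | _upsert_toml_value
-- ===== SOURCE A (Python) =====
-- def _upsert_toml_value(text: str, section_name: str, key: str, rendered_value: str) -> str:
--     lines = text.splitlines(keepends=True)
--     section_header = f"[{section_name}]"
--     section_start = -1
--     for idx, line in enumerate(lines):
--         if line.strip() == section_header:
--             section_start = idx
--             break
--
--     if section_start == -1:
--         if text and not text.endswith("\n"):
--             text += "\n"
--         if text and not text.endswith("\n\n"):
--             text += "\n"
--         return text + f"{section_header}\n{key} = {rendered_value}\n"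
--
--     section_end = len(lines)
--     for idx in range(section_start + 1, len(lines)):
--         stripped = lines[idx].strip()
--         if stripped.startswith("[") and stripped.endswith("]"):
--             section_end = idx
--             break
--
--     key_prefix = f"{key} = "
--     for idx in range(section_start + 1, section_end):
--         stripped = lines[idx].lstrip()
--         if stripped.startswith("#"):
--             continue
--         if stripped.startswith(f"{key}=") or stripped.startswith(f"{key} ="):
--             newline = "\n" if lines[idx].endswith("\n") else ""
--             lines[idx] = f"{key_prefix}{rendered_value}{newline}"
--             return "".join(lines)
--
--     lines.insert(section_end, f"{key_prefix}{rendered_value}\n")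
--     return "".join(lines)
-- ===== SOURCE B (Python) =====
-- def _upsert_toml_value(text: str, section_name: str, key: str, rendered_value: str) -> str:
--     # One-pass state machine over the lines (before-section / in-section / done),
--     # emitting output as it goes, instead of staged index-based passes.
--     header = f"[{section_name}]"
--     entry = f"{key} = {rendered_value}"
--     out = []
--     state = 0  # 0: looking for section, 1: inside section, 2: key handled
--     for line in text.splitlines(keepends=True):
--         if state == 0:
--             if line.strip() == header:
--                 state = 1
--         elif state == 1:
--             s = line.strip()
--             if s.startswith("[") and s.endswith("]"):
--                 out.append(entry + "\n")
--                 state = 2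
--             else:
--                 ls = line.lstrip()
--                 if not ls.startswith("#") and (
--                     ls.startswith(key + "=") or ls.startswith(key + " =")
--                 ):
--                     line = entry + ("\n" if line.endswith("\n") else "")
--                     state = 2
--         out.append(line)
--     if state == 0:
--         if text and not text.endswith("\n"):
--             text += "\n"
--         if text and not text.endswith("\n\n"):
--             text += "\n"
--         return text + header + "\n" + entry + "\n"
--     if state == 1:
--         out.append(entry + "\n")
--     return "".join(out)
-- ===== Notes on version B (the rewrite author's own statement) =====
-- stated objective: alternative
-- what changed: A's staged index-based passes (find the header index, find the section-end index, rescan the section for the key, then set/insert a line by index) are replaced by a single-pass state machine (before-section / in-section / done) that emits the output lines as it scans, appending or replacing the key line on the fly.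
import Mathlib
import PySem

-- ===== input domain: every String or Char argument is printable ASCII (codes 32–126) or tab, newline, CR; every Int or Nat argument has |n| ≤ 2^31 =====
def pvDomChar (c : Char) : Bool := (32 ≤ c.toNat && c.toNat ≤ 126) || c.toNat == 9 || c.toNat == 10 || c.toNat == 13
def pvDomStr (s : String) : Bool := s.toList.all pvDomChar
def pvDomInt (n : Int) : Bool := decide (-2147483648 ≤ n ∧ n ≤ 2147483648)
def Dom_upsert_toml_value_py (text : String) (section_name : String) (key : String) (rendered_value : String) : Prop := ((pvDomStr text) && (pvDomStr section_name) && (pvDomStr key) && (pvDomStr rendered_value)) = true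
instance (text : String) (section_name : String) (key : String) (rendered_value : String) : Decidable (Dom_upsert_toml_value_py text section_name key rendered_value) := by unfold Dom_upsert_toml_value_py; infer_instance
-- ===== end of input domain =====

-- B replaces A's staged index-based passes (find header, find section end, rescan for the
-- key, then set/insert by index) by a single-pass state machine that emits the output as it
-- scans; objective: alternative decomposition of the same O(n) task.

-- ===== shared primitive: text.splitlines(keepends=True) =====
-- exact on this task's domain (line breaks are only '\n', '\r', '\r\n' among the admitted chars)
def pvSplitKAux : List Char → List Char → List (List Char)
  | [], cur => if cur = [] then [] else [cur.reverse]
  | '\r' :: '\n' :: t, cur => (cur.reverse ++ ['\r', '\n']) :: pvSplitKAux t []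
  | '\n' :: t, cur => (cur.reverse ++ ['\n']) :: pvSplitKAux t []
  | '\r' :: t, cur => (cur.reverse ++ ['\r']) :: pvSplitKAux t []
  | c :: t, cur => pvSplitKAux t (c :: cur)
  termination_by cs _ => cs.length

def pvSplitK (cs : List Char) : List (List Char) := pvSplitK_impl cs
  where pvSplitK_impl (cs : List Char) : List (List Char) := pvSplitKAux cs []

-- ===== PORT A =====
-- A's first loop: index of the first line whose strip equals the section header
def pvFindSec : List (List Char) → List Char → Option Nat
  | [], _ => none
  | l :: t, h => if PySem.Chars.strip l = h then some 0 else (pvFindSec t h).map (· + 1)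

-- A's section-not-found branch (newline padding, then header + key line appended)
def pvNotFound (t hdr key rv : List Char) : List Char :=
  let t1 := if !t.isEmpty && !PySem.Chars.endswith t ['\n'] then t ++ ['\n'] else t
  let t2 := if !t1.isEmpty && !PySem.Chars.endswith t1 ['\n', '\n'] then t1 ++ ['\n'] else t1
  t2 ++ hdr ++ ['\n'] ++ key ++ [' ', '=', ' '] ++ rv ++ ['\n']

-- A's second loop: section_end as offset of the first header-like line after the section
def pvHdrOff : List (List Char) → Nat
  | [] => 0
  | l :: t =>
    let s := PySem.Chars.strip l
    if PySem.Chars.startswith s ['['] && PySem.Chars.endswith s [']'] then 0 else pvHdrOff t + 1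

-- A's third loop over lines[section_start+1 : section_end]: first key match (offset, line)
def pvKeyFind (key : List Char) : List (List Char) → Option (Nat × List Char)
  | [] => none
  | l :: t =>
    let ls := PySem.Chars.lstrip l
    if PySem.Chars.startswith ls ['#'] then (pvKeyFind key t).map (fun jm => (jm.1 + 1, jm.2))
    else if PySem.Chars.startswith ls (key ++ ['=']) || PySem.Chars.startswith ls (key ++ [' ', '=']) then
      some (0, l)
    else (pvKeyFind key t).map (fun jm => (jm.1 + 1, jm.2))

def upsert_toml_value_py (text : String) (section_name : String) (key : String) (rendered_value : String) : String :=
  let lines := pvSplitK text.toList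
  let hdr := '[' :: section_name.toList ++ [']']
  match pvFindSec lines hdr with
  | none => String.ofList (pvNotFound text.toList hdr key.toList rendered_value.toList)
  | some i =>
    let rest := lines.drop (i + 1)
    let e := i + 1 + pvHdrOff rest
    match pvKeyFind key.toList (rest.take (pvHdrOff rest)) with
    | some (j, l) =>
      String.ofList (PySem.Chars.join []
        (lines.set (i + 1 + j)
          (key.toList ++ [' ', '=', ' '] ++ rendered_value.toList ++
            (if PySem.Chars.endswith l ['\n'] then ['\n'] else []))))
    | none =>
      String.ofList (PySem.Chars.join [] (lines.insertIdx e (key.toList ++ [' ', '=', ' '] ++ rendered_value.toList ++ ['\n'])))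

-- ===== PORT B =====
-- B's single pass: the for-loop with its mutable `state` (0 before the section, 1 inside,
-- 2 once the key is handled) and `out` accumulator; returns (out, final state).
def pvStep (hdr key entry : List Char) : List (List Char) → Nat → List (List Char) × Nat
  | [], st => ([], st)
  | l :: t, st =>
    if st = 0 then
      let st' := if PySem.Chars.strip l = hdr then 1 else 0
      let r := pvStep hdr key entry t st'
      (l :: r.1, r.2)
    else if st = 1 then
      let s := PySem.Chars.strip l
      if PySem.Chars.startswith s ['['] && PySem.Chars.endswith s [']'] then
        let r := pvStep hdr key entry t 2
        ((entry ++ ['\n']) :: l :: r.1, r.2)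
      else
        let ls := PySem.Chars.lstrip l
        if !PySem.Chars.startswith ls ['#'] &&
            (PySem.Chars.startswith ls (key ++ ['=']) || PySem.Chars.startswith ls (key ++ [' ', '='])) then
          let r := pvStep hdr key entry t 2
          ((entry ++ (if PySem.Chars.endswith l ['\n'] then ['\n'] else [])) :: r.1, r.2)
        else
          let r := pvStep hdr key entry t 1
          (l :: r.1, r.2)
    else
      let r := pvStep hdr key entry t st
      (l :: r.1, r.2)

def upsert_toml_value_py_alt (text : String) (section_name : String) (key : String) (rendered_value : String) : String :=
  let hdr := '[' :: section_name.toList ++ [']']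
  let entry := key.toList ++ [' ', '=', ' '] ++ rendered_value.toList
  let r := pvStep hdr key.toList entry (pvSplitK text.toList) 0
  if r.2 = 0 then
    -- section never seen: pad text with newlines and append the new section
    let t1 := if !text.toList.isEmpty && !PySem.Chars.endswith text.toList ['\n'] then text.toList ++ ['\n'] else text.toList
    let t2 := if !t1.isEmpty && !PySem.Chars.endswith t1 ['\n', '\n'] then t1 ++ ['\n'] else t1
    String.ofList (t2 ++ hdr ++ ['\n'] ++ entry ++ ['\n'])
  else if r.2 = 1 then
    -- ran off the end still inside the section: the entry goes last
    String.ofList (PySem.Chars.join [] (r.1 ++ [entry ++ ['\n']]))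
  else
    String.ofList (PySem.Chars.join [] r.1)

-- ===== PRECONDITION & SPEC =====
def Spec_upsert_toml_value_py (text : String) (section_name : String) (key : String) (rendered_value : String) (out : String) : Prop := out = upsert_toml_value_py_alt text section_name key rendered_value
instance (text : String) (section_name : String) (key : String) (rendered_value : String) (out : String) : Decidable (Spec_upsert_toml_value_py text section_name key rendered_value out) := by unfold Spec_upsert_toml_value_py; infer_instance

-- ===== CLAIM (what is proved, stated in full; the proofs are below) =====
def Claim_equal_upsert_toml_value_py : Prop := ∀ (text : String) (section_name : String) (key : String) (rendered_value : String), Dom_upsert_toml_value_py text section_name key rendered_value → Spec_upsert_toml_value_py text section_name key rendered_value (upsert_toml_value_py text section_name key rendered_value)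

-- ===== LEMMAS AND PROOFS =====
-- state 2 copies the remaining lines unchanged
theorem pvStep_two (hdr key entry : List Char) (t : List (List Char)) :
    pvStep hdr key entry t 2 = (t, 2) := by
  induction t with
  | nil => rfl
  | cons l t ih => simp [pvStep, ih]

theorem pvHdrOff_le (t : List (List Char)) : pvHdrOff t ≤ t.length := by
  induction t with
  | nil => simp [pvHdrOff]
  | cons l t ih => simp only [pvHdrOff, List.length_cons]; split <;> omega

-- state 1 equals A's two loops over the section: key replacement if pvKeyFind hits,
-- else insertion at the first sub-header (or state 1 survives to the end)
theorem pvStep_one (hdr key entry : List Char) (t : List (List Char)) :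
    pvStep hdr key entry t 1 =
      match pvKeyFind key (t.take (pvHdrOff t)) with
      | some (j, l) =>
        (t.take j ++ (entry ++ (if PySem.Chars.endswith l ['\n'] then ['\n'] else [])) :: t.drop (j + 1), 2)
      | none =>
        if pvHdrOff t < t.length
        then (t.take (pvHdrOff t) ++ (entry ++ ['\n']) :: t.drop (pvHdrOff t), 2)
        else (t, 1) := by
  induction t with
  | nil => simp [pvStep, pvHdrOff, pvKeyFind]
  | cons l t ih =>
    by_cases hh : (PySem.Chars.startswith (PySem.Chars.strip l) ['['] &&
        PySem.Chars.endswith (PySem.Chars.strip l) [']']) = true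
    · simp [pvStep, pvHdrOff, pvKeyFind, hh, pvStep_two]
    · by_cases hc : PySem.Chars.startswith (PySem.Chars.lstrip l) ['#'] = true
      · simp only [pvStep, pvHdrOff, hh, if_false, Bool.false_eq_true, List.take_succ_cons,
          pvKeyFind, hc, if_true, Bool.not_true, Bool.false_and]
        cases hkf : pvKeyFind key (t.take (pvHdrOff t)) with
        | none =>
          simp only [hkf, Option.map_none] at ih ⊢
          by_cases he : pvHdrOff t < t.length
          · have h' : pvHdrOff t + 1 < t.length + 1 := by omega
            simp [ih, he, h']
          · have h' : ¬ (pvHdrOff t + 1 < t.length + 1) := by omega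
            simp [ih, he, h']
        | some jm =>
          obtain ⟨j, m⟩ := jm
          simp [hkf, ih]
      · by_cases hk : (PySem.Chars.startswith (PySem.Chars.lstrip l) (key ++ ['=']) ||
            PySem.Chars.startswith (PySem.Chars.lstrip l) (key ++ [' ', '='])) = true
        · simp [pvStep, pvHdrOff, pvKeyFind, hh, hc, hk, pvStep_two]
        · simp only [pvStep, pvHdrOff, hh, if_false, Bool.false_eq_true, List.take_succ_cons,
            pvKeyFind, hc, hk, reduceIte, Bool.not_false, Bool.true_and]
          cases hkf : pvKeyFind key (t.take (pvHdrOff t)) with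
          | none =>
            simp only [hkf, Option.map_none] at ih ⊢
            by_cases he : pvHdrOff t < t.length
            · have h' : pvHdrOff t + 1 < t.length + 1 := by omega
              simp [ih, he, h']
            · have h' : ¬ (pvHdrOff t + 1 < t.length + 1) := by omega
              simp [ih, he, h']
          | some jm =>
            obtain ⟨j, m⟩ := jm
            simp [hkf, ih]

-- state 0 scans for the section header exactly as A's first loop does
theorem pvStep_zero (hdr key entry : List Char) (lines : List (List Char)) :
    pvStep hdr key entry lines 0 =
      match pvFindSec lines hdr with
      | none => (lines, 0)
      | some i =>
        ((lines.take (i + 1)) ++ (pvStep hdr key entry (lines.drop (i + 1)) 1).1,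
          (pvStep hdr key entry (lines.drop (i + 1)) 1).2) := by
  induction lines with
  | nil => simp [pvStep, pvFindSec]
  | cons l t ih =>
    by_cases hm : PySem.Chars.strip l = hdr
    · simp [pvStep, pvFindSec, hm]
    · simp only [pvStep, pvFindSec, hm, if_false, reduceIte]
      cases hf : pvFindSec t hdr with
      | none => simp [hf] at ih; simp [ih]
      | some i => simp [hf] at ih; simp [ih]

-- pvKeyFind finds an existing element at its reported offset
theorem pvKeyFind_get (key : List Char) (xs : List (List Char)) (j : Nat) (l : List Char)
    (h : pvKeyFind key xs = some (j, l)) : j < xs.length ∧ xs[j]? = some l := by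
  induction xs generalizing j with
  | nil => simp [pvKeyFind] at h
  | cons x t ih =>
    simp only [pvKeyFind] at h
    split at h
    · rw [Option.map_eq_some_iff] at h
      obtain ⟨⟨j', m⟩, hkf, heq⟩ := h
      simp only [Prod.mk.injEq] at heq
      obtain ⟨hj, hm⟩ := heq
      subst hj hm
      obtain ⟨hlt, hget⟩ := ih j' hkf
      exact ⟨by simpa using Nat.succ_lt_succ hlt, by simpa using hget⟩
    · split at h
      · simp only [Option.some.injEq, Prod.mk.injEq] at h
        obtain ⟨h1, h2⟩ := h
        subst h1 h2; simp
      · rw [Option.map_eq_some_iff] at h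
        obtain ⟨⟨j', m⟩, hkf, heq⟩ := h
        simp only [Prod.mk.injEq] at heq
        obtain ⟨hj, hm⟩ := heq
        subst hj hm
        obtain ⟨hlt, hget⟩ := ih j' hkf
        exact ⟨by simpa using Nat.succ_lt_succ hlt, by simpa using hget⟩

-- insertIdx at an in-range position is take ++ [x] ++ drop
theorem pvInsertIdx_eq (xs : List (List Char)) (n : Nat) (x : List Char) (h : n ≤ xs.length) :
    xs.insertIdx n x = xs.take n ++ x :: xs.drop n := by
  induction xs generalizing n with
  | nil =>
    cases n with
    | zero => simp
    | succ n => exact absurd h (by simp)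
  | cons y t ih =>
    cases n with
    | zero => simp
    | succ n => simp only [List.insertIdx_succ_cons, List.take_succ_cons, List.drop_succ_cons,
        List.cons_append]; rw [ih n (by simpa using h)]

-- ===== VERDICT (by name: the statement is the Claim_ definition above) =====
-- pvFindSec reports an in-range index
theorem pvFindSec_lt (lines : List (List Char)) (hdr : List Char) (i : Nat)
    (h : pvFindSec lines hdr = some i) : i < lines.length := by
  induction lines generalizing i with
  | nil => simp [pvFindSec] at h
  | cons l t ih =>
    simp only [pvFindSec] at h
    split at h
    · simp only [Option.some.injEq] at h
      simp only [List.length_cons]; omega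
    · rw [Option.map_eq_some_iff] at h
      obtain ⟨i', hi', rfl⟩ := h
      have := ih i' hi'
      simp only [List.length_cons]; omega

theorem upsert_toml_value_py_spec : Claim_equal_upsert_toml_value_py := by
  intro text section_name key rendered_value _
  unfold Spec_upsert_toml_value_py upsert_toml_value_py upsert_toml_value_py_alt
  simp only [pvStep_zero]
  cases hf : pvFindSec (pvSplitK text.toList) ('[' :: section_name.toList ++ [']']) with
  | none => simp [pvNotFound]
  | some i =>
    have hi : i < (pvSplitK text.toList).length := pvFindSec_lt _ _ _ hf
    simp only [pvStep_one]
    cases hkf : pvKeyFind key.toList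
        (((pvSplitK text.toList).drop (i + 1)).take (pvHdrOff ((pvSplitK text.toList).drop (i + 1)))) with
    | some jl =>
      obtain ⟨j, l⟩ := jl
      have hj : j < ((pvSplitK text.toList).drop (i + 1)).length := by
        have h1 := (pvKeyFind_get _ _ _ _ hkf).1
        rw [List.length_take] at h1
        omega
      dsimp only
      rw [List.set_eq_take_cons_drop _ (by rw [List.length_drop] at hj; omega)]
      rw [List.take_add]
      have hidx : i + 1 + j + 1 = (i + 1) + (j + 1) := by omega
      rw [hidx, ← List.drop_drop]
      simp [List.append_assoc]
    | none =>
      dsimp only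
      by_cases he : pvHdrOff ((pvSplitK text.toList).drop (i + 1)) <
          ((pvSplitK text.toList).drop (i + 1)).length
      · simp only [he, if_true]
        rw [pvInsertIdx_eq _ _ _ (by rw [List.length_drop] at he; omega)]
        rw [List.take_add, ← List.drop_drop]
        simp [List.append_assoc]
      · simp only [he, if_false]
        have hle := pvHdrOff_le ((pvSplitK text.toList).drop (i + 1))
        have he' : pvHdrOff ((pvSplitK text.toList).drop (i + 1)) =
            ((pvSplitK text.toList).drop (i + 1)).length := by omega
        rw [pvInsertIdx_eq _ _ _ (by rw [List.length_drop] at he'; omega)]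
        have hlen : (pvSplitK text.toList).length ≤
            i + 1 + pvHdrOff ((pvSplitK text.toList).drop (i + 1)) := by
          rw [he', List.length_drop]; omega
        rw [List.drop_eq_nil_of_le hlen, List.take_add, he']
        rw [List.take_length]
        simp [List.take_append_drop]
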